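-- pv_equiv track=rewrite | github.com/liyusang1/ProblemSolving | ProblemSolving/weeklyChallenge.py | solution
-- ===== SOURCE A (Python) =====
-- def solution(price, money, count):
--     totalMoney = 0
--
--     for i in range(1, count + 1):
--         totalMoney += i * price
--
--     answer = totalMoney - money
--     if answer <= 0:
--         answer = 0
--
--     return answer
-- ===== SOURCE B (Python) =====
-- def solution(price, money, count):
--     n = count if count > 0 else 0
--     need = price * n * (n + 1) // 2 - money
--     return need if need > 0 else 0
-- ===== Notes on version B (the rewrite author's own statement) =====
-- stated objective: faster
-- what changed: Replaces the O(count) summation loop with the closed-form arithmetic-series formula price*n*(n+1)//2 (n = max(count,0)) and a max-with-0.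
import Mathlib
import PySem

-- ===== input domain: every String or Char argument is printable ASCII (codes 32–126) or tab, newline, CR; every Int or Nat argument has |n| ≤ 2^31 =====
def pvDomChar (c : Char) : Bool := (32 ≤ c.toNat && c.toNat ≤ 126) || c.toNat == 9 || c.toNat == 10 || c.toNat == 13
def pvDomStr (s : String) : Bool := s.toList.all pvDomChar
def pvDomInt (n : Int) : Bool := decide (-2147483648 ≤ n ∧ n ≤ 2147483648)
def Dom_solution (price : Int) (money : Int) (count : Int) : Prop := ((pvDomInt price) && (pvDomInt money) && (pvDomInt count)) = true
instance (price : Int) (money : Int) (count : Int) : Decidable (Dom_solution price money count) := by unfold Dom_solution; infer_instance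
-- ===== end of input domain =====

-- B replaces A's O(count) summation loop with the closed-form arithmetic-series formula (objective: faster).

-- ===== PORT A =====
def solution (price : Int) (money : Int) (count : Int) : Int :=
  let totalMoney := (PySem.List.pyRange 1 (count + 1) 1).foldl (fun acc i => acc + i * price) 0
  let answer := totalMoney - money
  if answer ≤ 0 then 0 else answer

-- ===== PORT B =====
def solution_alt (price : Int) (money : Int) (count : Int) : Int :=
  let n := if count > 0 then count else 0
  let need := PySem.Int.floordiv (price * n * (n + 1)) 2 - money
  if need > 0 then need else 0

-- ===== PRECONDITION & SPEC =====
def Spec_solution (price : Int) (money : Int) (count : Int) (out : Int) : Prop := out = solution_alt price money count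
instance (price : Int) (money : Int) (count : Int) (out : Int) : Decidable (Spec_solution price money count out) := by unfold Spec_solution; infer_instance

-- ===== CLAIM (what is proved, stated in full; the proofs are below) =====
def Claim_equal_solution : Prop := ∀ (price : Int) (money : Int) (count : Int), Dom_solution price money count → Spec_solution price money count (solution price money count)

-- ===== LEMMAS AND PROOFS =====

-- the loop total doubled equals price * c * (c+1), for 0 ≤ c
theorem pv_two_mul_loop (price : Int) : ∀ n : Nat,
    2 * (PySem.List.pyRange 1 ((n : Int) + 1) 1).foldl (fun acc i => acc + i * price) 0
      = price * (n : Int) * ((n : Int) + 1) := by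
  intro n
  induction n with
  | zero => simp [PySem.List.pyRange_one_eq_nil]
  | succ k ih =>
    have h : PySem.List.pyRange 1 (((k : Int) + 1) + 1) 1
        = PySem.List.pyRange 1 ((k : Int) + 1) 1 ++ [(k : Int) + 1] :=
      PySem.List.pyRange_one_succ_right (by omega)
    push_cast
    rw [h, List.foldl_append]
    simp only [List.foldl]
    push_cast at ih
    ring_nf
    ring_nf at ih
    omega

theorem pv_loop_eq_closed (price : Int) (c : Int) (hc : 0 ≤ c) :
    (PySem.List.pyRange 1 (c + 1) 1).foldl (fun acc i => acc + i * price) 0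
      = PySem.Int.floordiv (price * c * (c + 1)) 2 := by
  obtain ⟨n, rfl⟩ : ∃ n : Nat, c = (n : Int) := ⟨c.toNat, (Int.toNat_of_nonneg hc).symm⟩
  have h2 := pv_two_mul_loop price n
  rw [eq_comm, PySem.Int.floordiv_eq_iff_of_pos (by omega)]
  omega

-- ===== VERDICT (by name: the statement is the Claim_ definition above) =====
theorem solution_spec : Claim_equal_solution := by
  intro price money count _
  unfold Spec_solution solution solution_alt
  by_cases hc : count > 0
  · simp only [hc, if_pos]
    rw [pv_loop_eq_closed price count (le_of_lt hc)]
    split <;> split <;> omega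
  · have hnil : PySem.List.pyRange 1 (count + 1) 1 = [] :=
      PySem.List.pyRange_one_eq_nil (by omega)
    simp only [hc, if_false, hnil, List.foldl_nil]
    have : PySem.Int.floordiv (price * 0 * (0 + 1)) 2 = 0 := by
      simp [PySem.Int.floordiv]
    rw [this]
    split <;> split <;> omega
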